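-- pv_equiv track=rewrite | github.com/alexrudnick/chipa | hmmwsd/learn.py | target_words_for_each_source_word
-- ===== SOURCE A (Python) =====
-- from operator import itemgetter
--
-- def target_words_for_each_source_word(ss, ts, alignment):
--     """Given a list of tokens in source language, a list of tokens in target
--     language, and a list of Berkeley-style alignments of the form target-source,
--     for each source word, return the list of corresponding target words."""
--     alignment = [tuple(map(int, pair.split('-'))) for pair in alignment]
--     out = [list() for i in range(len(ss))]
--     indices = [list() for i in range(len(ss))]
--     alignment.sort(key=itemgetter(0))
--     for (ti,si) in alignment:
--         ## make sure we're grabbing contiguous phrases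
--         ## TODO strip punctuation
--         if (not indices[si]) or (ti == indices[si][-1] + 1):
--             indices[si].append(ti)
--             out[si].append(ts[ti])
--     return [" ".join(targetwords) for targetwords in out]
-- ===== SOURCE B (Python) =====
-- def target_words_for_each_source_word(ss, ts, alignment):
--     sets = [set() for _ in ss]
--     for pair in alignment:
--         ti, si = (int(x) for x in pair.split('-'))
--         sets[si].add(ti)
--     result = []
--     for s in sets:
--         words = []
--         if s:
--             t = min(s)
--             while t in s:
--                 words.append(ts[t])
--                 t += 1
--         result.append(" ".join(words))
--     return result
-- ===== Notes on version B (the rewrite author's own statement) =====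
-- stated objective: alternative
-- what changed: B drops A's global sort of the alignment and its fold over per-source list-of-lists run state: it buckets target indices into per-source hash sets in one pass, then for each source takes min(set) and chases successors (t, t+1, ...) through the set to emit the contiguous phrase.
-- outside the precondition, e.g. on target_words_for_each_source_word(['a'], ['x'], ['0-0', '5-0']): A returns ['x'], B returns ['x']
import Mathlib
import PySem

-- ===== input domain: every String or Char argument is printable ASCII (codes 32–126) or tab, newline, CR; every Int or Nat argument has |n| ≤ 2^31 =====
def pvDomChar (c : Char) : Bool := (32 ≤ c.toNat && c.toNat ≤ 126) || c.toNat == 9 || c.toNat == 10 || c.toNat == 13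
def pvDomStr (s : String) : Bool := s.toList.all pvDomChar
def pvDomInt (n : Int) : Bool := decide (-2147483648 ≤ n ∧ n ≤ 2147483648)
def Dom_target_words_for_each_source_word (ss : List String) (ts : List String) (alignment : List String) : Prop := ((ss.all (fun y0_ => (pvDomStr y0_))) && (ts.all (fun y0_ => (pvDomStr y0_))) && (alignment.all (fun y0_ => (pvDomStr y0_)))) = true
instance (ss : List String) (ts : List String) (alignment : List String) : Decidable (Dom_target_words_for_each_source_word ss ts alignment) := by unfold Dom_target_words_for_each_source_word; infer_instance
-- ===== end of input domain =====

-- B replaces A's global sort + per-source run-state fold by per-source hash sets and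
-- successor chasing from min(set) (objective: alternative decomposition, no sorting).

-- ===== PORT A =====
-- 'tuple(map(int, pair.split('-')))': none = ValueError (wrong arity or non-int piece), excluded by Pre_
def pvParsePair? (p : String) : Option (Int × Int) :=
  match ((PySem.Str.split? p "-").getD []).map PySem.Int.ofStr? with
  | [some ti, some si] => some (ti, si)
  | _ => none

def pvParsePair (p : String) : Int × Int := (pvParsePair? p).getD (0, 0)

-- one iteration of A's for-loop over the sorted alignment
def pvStepA (ts : List String) (st : List (List String) × List (List Int)) (p : Int × Int) :
    List (List String) × List (List Int) :=
  let cur := PySem.List.pyGetD st.2 p.2 []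
  if cur.isEmpty ∨ p.1 = PySem.List.pyGetD cur (-1) 0 + 1 then
    (PySem.List.pySetD st.1 p.2 (PySem.List.pyGetD st.1 p.2 [] ++ [PySem.List.pyGetD ts p.1 ""]),
     PySem.List.pySetD st.2 p.2 (cur ++ [p.1]))
  else st

def target_words_for_each_source_word (ss : List String) (ts : List String) (alignment : List String) : List String :=
  let alignment2 := alignment.map pvParsePair
  let out : List (List String) := List.replicate ss.length []
  let indices : List (List Int) := List.replicate ss.length []
  let sortedAl := PySem.List.sorted alignment2 (fun p => p.1) false
  let final := sortedAl.foldl (pvStepA ts) (out, indices)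
  final.1.map (fun targetwords => PySem.Str.join " " targetwords)

-- ===== PORT B =====
def pvParsePairB? (p : String) : Option (Int × Int) :=
  match ((PySem.Str.split? p "-").getD []).map PySem.Int.ofStr? with
  | [some ti, some si] => some (ti, si)
  | _ => none

def pvParsePairB (p : String) : Int × Int := (pvParsePairB? p).getD (0, 0)

-- B's 'while t in s: words.append(ts[t]); t += 1' loop; the fuel len(s) only makes it
-- total: the chased values are distinct members of s, so the loop runs at most len(s) times
def pvChase (ts : List String) (s : PySem.Set Int) : Nat → Int → List String
  | 0, _ => []
  | n + 1, t =>
    if s.contains t then PySem.List.pyGetD ts t "" :: pvChase ts s n (t + 1) else []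

def target_words_for_each_source_word_alt (ss : List String) (ts : List String) (alignment : List String) : List String :=
  let pairs := alignment.map pvParsePairB
  let sets := pairs.foldl
    (fun (bs : List (PySem.Set Int)) p =>
      PySem.List.pySetD bs p.2 (PySem.Set.add (PySem.List.pyGetD bs p.2 []) p.1))
    (List.replicate ss.length ([] : PySem.Set Int))
  sets.map (fun s =>
    match PySem.List.min? s (fun x => x) with
    | none => PySem.Str.join " " []
    | some t => PySem.Str.join " " (pvChase ts s s.length t))

-- ===== PRECONDITION & SPEC =====
def pvPairOK (ss : List String) (ts : List String) (p : String) : Bool :=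
  match pvParsePair? p with
  | some (ti, si) => decide (0 ≤ ti ∧ ti < (ts.length : Int) ∧ 0 ≤ si ∧ si < (ss.length : Int))
  | none => false

-- Pre_ excludes alignment entries that do not parse as 'ti-si' (ValueError) or whose indices are out of
-- range (IndexError); it uniformly requires ti < len(ts) although A skips reading ts[ti] for a pair that
-- breaks a contiguous run, so a few inputs on which A returns are excluded (see claim cites).
def Pre_target_words_for_each_source_word (ss : List String) (ts : List String) (alignment : List String) : Prop :=
  ∀ p ∈ alignment, pvPairOK ss ts p = true

instance (ss : List String) (ts : List String) (alignment : List String) : Decidable (Pre_target_words_for_each_source_word ss ts alignment) := by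
  unfold Pre_target_words_for_each_source_word; infer_instance

def pvWitness_target_words_for_each_source_word : List String × List String × List String :=
  (["le", "chat"], ["the", "cat"], ["0-0", "1-1"])

def Spec_target_words_for_each_source_word (ss : List String) (ts : List String) (alignment : List String) (out : List String) : Prop := out = target_words_for_each_source_word_alt ss ts alignment
instance (ss : List String) (ts : List String) (alignment : List String) (out : List String) : Decidable (Spec_target_words_for_each_source_word ss ts alignment out) := by unfold Spec_target_words_for_each_source_word; infer_instance

-- ===== CLAIM (what is proved, stated in full; the proofs are below) =====
def Claim_equal_target_words_for_each_source_word : Prop := ∀ (ss : List String) (ts : List String) (alignment : List String), Dom_target_words_for_each_source_word ss ts alignment → Pre_target_words_for_each_source_word ss ts alignment → Spec_target_words_for_each_source_word ss ts alignment (target_words_for_each_source_word ss ts alignment)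

-- ===== LEMMAS AND PROOFS =====

lemma pvParsePairB_eq : pvParsePairB = pvParsePair := rfl

lemma pvPairOK_si {ss ts : List String} {q : String} (h : pvPairOK ss ts q = true) :
    0 ≤ (pvParsePair q).2 ∧ (pvParsePair q).2 < (ss.length : Int) := by
  unfold pvPairOK at h
  unfold pvParsePair
  cases hp : pvParsePair? q with
  | none => rw [hp] at h; simp at h
  | some v =>
    rw [hp] at h
    obtain ⟨ti, si⟩ := v
    simp at h ⊢
    exact ⟨h.2.2.1, h.2.2.2⟩

-- any per-source bucket fold 'bs[si] = g(bs[si], ti)', per component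
lemma foldB_proj {β : Type} (g : β → Int → β) (e : β) (l : List (Int × Int)) (bs : List β)
    (hl : ∀ p ∈ l, 0 ≤ p.2 ∧ p.2 < (bs.length : Int)) :
    (l.foldl (fun (bs : List β) p => PySem.List.pySetD bs p.2 (g (PySem.List.pyGetD bs p.2 e) p.1)) bs).length = bs.length ∧
    ∀ i : Nat, i < bs.length →
      (l.foldl (fun (bs : List β) p => PySem.List.pySetD bs p.2 (g (PySem.List.pyGetD bs p.2 e) p.1)) bs).getD i e
        = ((l.filter (fun p => p.2 == (i : Int))).map (·.1)).foldl g (bs.getD i e) := by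
  induction l generalizing bs with
  | nil => simp
  | cons p l ih =>
    obtain ⟨hp0, hpl⟩ := hl p (by simp)
    obtain ⟨j, hj⟩ : ∃ j : Nat, p.2 = (j : Int) := ⟨p.2.toNat, (Int.toNat_of_nonneg hp0).symm⟩
    have hjl : j < bs.length := by omega
    have hset : PySem.List.pySetD bs p.2 (g (PySem.List.pyGetD bs p.2 e) p.1)
        = bs.set j (g (bs.getD j e) p.1) := by
      rw [hj, PySem.List.pySetD_natCast, PySem.List.pyGetD_natCast]
    obtain ⟨ihlen, ihget⟩ := ih (bs.set j (g (bs.getD j e) p.1))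
      (by intro q hq; simpa using hl q (by simp [hq]))
    refine ⟨by simpa [hset] using ihlen, ?_⟩
    intro i hi
    simp only [List.foldl_cons, hset]
    rw [ihget i (by simpa using hi)]
    by_cases hc : j = i
    · subst hc
      rw [List.filter_cons_of_pos (by simp [hj]),
        List.getD_eq_getElem?_getD, List.getElem?_set_self (by omega)]
      simp
    · rw [List.filter_cons_of_neg (by simp [hj]; omega),
        List.getD_eq_getElem?_getD, List.getElem?_set_ne hc, ← List.getD_eq_getElem?_getD]

-- one iteration of A's loop with a scalar view of one bucket's state
def pvRunStep (ts : List String) (acc : List String × Option Int) (ti : Int) : List String × Option Int :=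
  match acc.2 with
  | none => (acc.1 ++ [PySem.List.pyGetD ts ti ""], some ti)
  | some l => if ti = l + 1 then (acc.1 ++ [PySem.List.pyGetD ts ti ""], some ti) else acc

-- A's fold, per component, as a pvRunStep fold on the filtered ti's
lemma pvStepA_comp (ts : List String) (st : List (List String) × List (List Int)) (p : Int × Int)
    (h0 : 0 ≤ p.2) (hlt : p.2 < (st.2.length : Int)) (hlen : st.1.length = st.2.length) :
    (pvStepA ts st p).1.length = st.1.length ∧ (pvStepA ts st p).2.length = st.2.length ∧
    ∀ i : Nat, i < st.2.length →
      ((pvStepA ts st p).1.getD i [], ((pvStepA ts st p).2.getD i []).getLast?)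
        = if p.2 == (i : Int) then pvRunStep ts (st.1.getD i [], (st.2.getD i []).getLast?) p.1
          else (st.1.getD i [], (st.2.getD i []).getLast?) := by
  obtain ⟨j, hj⟩ : ∃ j : Nat, p.2 = (j : Int) := ⟨p.2.toNat, (Int.toNat_of_nonneg h0).symm⟩
  have hjl : j < st.2.length := by omega
  have hgd2 : ∀ v : List Int, (st.2.set j v).getD j [] = v := by
    intro v
    rw [List.getD_eq_getElem?_getD, List.getElem?_set_self (by omega)]
    rfl
  have hgd1 : ∀ v : List String, (st.1.set j v).getD j [] = v := by
    intro v
    rw [List.getD_eq_getElem?_getD, List.getElem?_set_self (by omega)]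
    rfl
  have hne2 : ∀ (v : List Int) (i : Nat), j ≠ i → (st.2.set j v).getD i [] = st.2.getD i [] := by
    intro v i hne
    rw [List.getD_eq_getElem?_getD, List.getElem?_set_ne hne, ← List.getD_eq_getElem?_getD]
  have hne1 : ∀ (v : List String) (i : Nat), j ≠ i → (st.1.set j v).getD i [] = st.1.getD i [] := by
    intro v i hne
    rw [List.getD_eq_getElem?_getD, List.getElem?_set_ne hne, ← List.getD_eq_getElem?_getD]
  unfold pvStepA
  simp only [hj, PySem.List.pySetD_natCast, PySem.List.pyGetD_natCast]
  split
  · rename_i hcond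
    refine ⟨by simp, by simp, ?_⟩
    intro i hi
    by_cases hji : j = i
    · subst hji
      rw [if_pos (by simp), hgd1, hgd2]
      rcases hc : st.2.getD j [] with _ | ⟨x, xs⟩
      · simp [pvRunStep]
      · rw [hc] at hcond
        have hne : (x :: xs) ≠ [] := by simp
        rcases hcond with hcond | hcond
        · simp at hcond
        · rw [PySem.List.pyGetD_neg_one _ _ hne] at hcond
          simp only [pvRunStep, List.getLast?_eq_some_getLast hne, hcond]
          rw [if_pos trivial]
          refine Prod.ext rfl ?_
          dsimp only
          rw [List.getLast?_concat]
    · rw [if_neg (by simp; omega), hne1 _ _ hji, hne2 _ _ hji]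
  · rename_i hcond
    refine ⟨rfl, rfl, ?_⟩
    intro i hi
    by_cases hji : j = i
    · subst hji
      rw [if_pos (by simp)]
      rcases hc : st.2.getD j [] with _ | ⟨x, xs⟩
      · rw [hc] at hcond; simp at hcond
      · rw [hc] at hcond
        have hne : (x :: xs) ≠ [] := by simp
        rw [not_or] at hcond
        rw [PySem.List.pyGetD_neg_one _ _ hne] at hcond
        simp only [pvRunStep, List.getLast?_eq_some_getLast hne]
        rw [if_neg hcond.2]
    · rw [if_neg (by simp; omega)]

lemma foldA_proj (ts : List String) (l : List (Int × Int)) (st : List (List String) × List (List Int))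
    (hlen : st.1.length = st.2.length)
    (hl : ∀ p ∈ l, 0 ≤ p.2 ∧ p.2 < (st.2.length : Int)) :
    (l.foldl (pvStepA ts) st).1.length = st.1.length ∧
    (l.foldl (pvStepA ts) st).2.length = st.2.length ∧
    ∀ i : Nat, i < st.2.length →
      ((l.foldl (pvStepA ts) st).1.getD i [], ((l.foldl (pvStepA ts) st).2.getD i []).getLast?)
        = ((l.filter (fun p => p.2 == (i : Int))).map (·.1)).foldl (pvRunStep ts)
            (st.1.getD i [], (st.2.getD i []).getLast?) := by
  induction l generalizing st with
  | nil => simp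
  | cons p l ih =>
    obtain ⟨hp0, hpl⟩ := hl p (by simp)
    obtain ⟨h1, h2, hcomp⟩ := pvStepA_comp ts st p hp0 hpl hlen
    obtain ⟨ih1, ih2, ihcomp⟩ := ih (pvStepA ts st p) (by omega)
      (by intro q hq; rw [h2]; exact hl q (by simp [hq]))
    refine ⟨by simpa [ih1] using h1, by simpa [ih2] using h2, ?_⟩
    intro i hi
    simp only [List.foldl_cons]
    rw [ihcomp i (by omega), hcomp i hi]
    by_cases hc : p.2 == (i : Int)
    · rw [if_pos hc, List.filter_cons_of_pos (p := fun q : Int × Int => q.2 == (i : Int)) (l := l) hc]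
      simp
    · rw [if_neg (by simpa using hc),
        List.filter_cons_of_neg (p := fun q : Int × Int => q.2 == (i : Int)) (l := l) (by simpa using hc)]

-- the filtered slice of the globally key-sorted list is the sorted bucket
lemma filter_sorted_fst (l : List (Int × Int)) (c : Int) :
    ((PySem.List.sorted l (fun p => p.1) false).filter (fun p => p.2 == c)).map (·.1)
      = PySem.List.sorted ((l.filter (fun p => p.2 == c)).map (·.1)) (fun x => x) false := by
  refine (PySem.List.sorted_id_eq_of_perm_of_pairwise
    ((l.filter (fun p => p.2 == c)).map (·.1))
    (((PySem.List.sorted l (fun p => p.1) false).filter (fun p => p.2 == c)).map (·.1)) ?_ ?_).symm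
  · exact (((PySem.List.sorted_perm l (fun p => p.1) false).filter _).map _)
  · rw [List.pairwise_map]
    exact (PySem.List.sorted_pairwise l (fun p => p.1)).sublist List.filter_sublist

-- the sequence of ti's A keeps for one bucket, read off its sorted bucket list
def pvHfun : Int → List Int → List Int
  | _, [] => []
  | c, x :: xs => if x = c + 1 then x :: pvHfun x xs else pvHfun c xs

-- integer skeleton of B's chase loop
def pvChaseI (s : List Int) : Nat → Int → List Int
  | 0, _ => []
  | n + 1, t => if s.contains t then t :: pvChaseI s n (t + 1) else []

lemma pvChase_eq_map (ts : List String) (s : PySem.Set Int) (n : Nat) (t : Int) :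
    pvChase ts s n t = (pvChaseI s n t).map (fun x => PySem.List.pyGetD ts x "") := by
  induction n generalizing t with
  | zero => simp [pvChase, pvChaseI]
  | succ n ih =>
    simp only [pvChase, pvChaseI, PySem.Set.contains_eq_listContains]
    split <;> simp [ih]

lemma foldRun_char (ts : List String) (l : List Int) : ∀ (ws : List String) (c : Int),
    l.foldl (pvRunStep ts) (ws, some c)
      = (ws ++ (pvHfun c l).map (fun t => PySem.List.pyGetD ts t ""), some ((pvHfun c l).getLastD c)) := by
  induction l with
  | nil => intro ws c; simp [pvHfun]
  | cons x xs ih =>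
    intro ws c
    simp only [List.foldl_cons, pvHfun]
    by_cases h : x = c + 1
    · rw [if_pos h]
      have hstep : pvRunStep ts (ws, some c) x = (ws ++ [PySem.List.pyGetD ts x ""], some x) := by
        simp [pvRunStep, h]
      rw [hstep, ih]
      refine Prod.ext (by simp) ?_
      simp only []
      rw [List.getLastD_cons]
    · rw [if_neg h]
      have hstep : pvRunStep ts (ws, some c) x = (ws, some c) := by
        simp [pvRunStep, h]
      rw [hstep, ih]

lemma hfun_nil_of_big (c : Int) (l : List Int) (h : ∀ y ∈ l, c + 1 < y) : pvHfun c l = [] := by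
  induction l with
  | nil => rfl
  | cons x xs ih =>
    have hx := h x (by simp)
    simp only [pvHfun, if_neg (by omega : ¬ x = c + 1)]
    exact ih (fun y hy => h y (by simp [hy]))

def pvDcount (c : Int) (l : List Int) : Nat := (l.toFinset.filter (fun y => c < y)).card

lemma pvDcount_cons_le (c x : Int) (xs : List Int) : pvDcount c xs ≤ pvDcount c (x :: xs) := by
  apply Finset.card_le_card
  intro y hy
  simp only [Finset.mem_filter, List.mem_toFinset, List.toFinset_cons, Finset.mem_insert] at hy ⊢
  tauto

lemma pvDcount_succ (c x : Int) (xs : List Int) (hcx : c < x) :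
    pvDcount x xs + 1 ≤ pvDcount c (x :: xs) := by
  have hsub : insert x (xs.toFinset.filter (fun y => x < y)) ⊆ ((x :: xs).toFinset.filter (fun y => c < y)) := by
    intro y hy
    simp only [Finset.mem_insert, Finset.mem_filter, List.mem_toFinset, List.toFinset_cons] at hy ⊢
    rcases hy with rfl | ⟨hy1, hy2⟩
    · exact ⟨Or.inl rfl, hcx⟩
    · exact ⟨Or.inr hy1, by omega⟩
  have hx : x ∉ xs.toFinset.filter (fun y => x < y) := by
    simp
  calc pvDcount x xs + 1 = (insert x (xs.toFinset.filter (fun y => x < y))).card := by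
        rw [Finset.card_insert_of_notMem hx]; rfl
    _ ≤ _ := Finset.card_le_card hsub

-- A's kept run equals B's successor chase, on a sorted list
lemma hfun_eq_chase (s : List Int) : ∀ (l : List Int) (c : Int) (n : Nat),
    l.Pairwise (· ≤ ·) →
    (∀ t : Int, c < t → (s.contains t = true ↔ t ∈ l)) →
    pvDcount c l ≤ n →
    pvHfun c l = pvChaseI s n (c + 1) := by
  intro l
  induction l with
  | nil =>
    intro c n _ hmem _
    have hnot : c + 1 ∉ s := by
      intro h
      exact absurd ((hmem (c + 1) (by omega)).1 (by simpa using h)) (by simp)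
    cases n <;> simp [pvChaseI, pvHfun, hnot]
  | cons x xs ih =>
    intro c n hsort hmem hn
    have hxle : ∀ y ∈ xs, x ≤ y := fun y hy => (List.pairwise_cons.1 hsort).1 y hy
    by_cases hxc : x = c + 1
    · subst hxc
      have hcont : (c + 1) ∈ s := by
        have := (hmem (c + 1) (by omega)).2 (by simp)
        simpa using this
      have h1 : 1 ≤ pvDcount c ((c + 1) :: xs) := by
        have hmem1 : c + 1 ∈ ((c + 1) :: xs).toFinset.filter (fun y => c < y) := by
          simp [List.toFinset_cons]
        calc 1 = ({c + 1} : Finset Int).card := by simp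
          _ ≤ _ := Finset.card_le_card (by intro y hy; simp at hy; subst hy; exact hmem1)
      obtain ⟨m, rfl⟩ : ∃ m, n = m + 1 := ⟨n - 1, by omega⟩
      have hrest : pvHfun (c + 1) xs = pvChaseI s m (c + 1 + 1) := by
        refine ih (c + 1) m (List.pairwise_cons.1 hsort).2 ?_ ?_
        · intro t ht
          rw [hmem t (by omega)]
          constructor
          · intro h; rcases List.mem_cons.1 h with rfl | h
            · omega
            · exact h
          · intro h; exact List.mem_cons_of_mem _ h
        · have := pvDcount_succ c (c + 1) xs (by omega)
          omega
      simp [pvHfun, pvChaseI, hcont, hrest]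
    · by_cases hxle' : x ≤ c
      · simp only [pvHfun, if_neg hxc]
        refine ih c n (List.pairwise_cons.1 hsort).2 ?_ ?_
        · intro t ht
          rw [hmem t ht]
          constructor
          · intro h; rcases List.mem_cons.1 h with rfl | h
            · omega
            · exact h
          · intro h; exact List.mem_cons_of_mem _ h
        · exact le_trans (pvDcount_cons_le c x xs) hn
      · have hbig : ∀ y ∈ x :: xs, c + 1 < y := by
          intro y hy
          rcases List.mem_cons.1 hy with rfl | hy
          · omega
          · have := hxle y hy; omega
        rw [hfun_nil_of_big c _ hbig]
        have hnot : c + 1 ∉ s := by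
          intro h
          have := hbig _ ((hmem (c + 1) (by omega)).1 (by simpa using h))
          omega
        cases n <;> simp [pvChaseI, hnot]

-- per bucket: A's fold over the sorted ti list equals B's min-then-chase over the ti set
lemma bucket_eq (ts : List String) (tis : List Int) :
    (List.foldl (pvRunStep ts) ([], none) (PySem.List.sorted tis (fun x => x) false)).1
      = (match PySem.List.min? (PySem.Set.ofList tis) (fun x => x) with
         | none => []
         | some t => pvChase ts (PySem.Set.ofList tis) (PySem.Set.ofList tis).length t) := by
  rcases hsd : PySem.List.sorted tis (fun x => x) false with _ | ⟨x, xs⟩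
  · have htis : tis = [] := by
      have := PySem.List.sorted_perm tis (fun x => x) false
      rw [hsd] at this
      exact this.symm.eq_nil
    subst htis
    simp [PySem.Set.ofList, PySem.List.min?]
  · have hperm : tis.Perm (x :: xs) := by
      have := PySem.List.sorted_perm tis (fun x => x) false
      rw [hsd] at this; exact this.symm
    have hsort : (x :: xs).Pairwise (· ≤ ·) := by
      have := PySem.List.sorted_pairwise tis (fun x => x)
      rwa [hsd] at this
    have hxle : ∀ y ∈ x :: xs, x ≤ y := by
      intro y hy
      rcases List.mem_cons.1 hy with rfl | hy
      · exact le_refl _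
      · exact (List.pairwise_cons.1 hsort).1 y hy
    have hmem_s : ∀ t : Int, t ∈ PySem.Set.ofList tis ↔ t ∈ x :: xs := by
      intro t
      rw [PySem.Set.mem_ofList]
      exact ⟨fun h => hperm.mem_iff.1 h, fun h => hperm.mem_iff.2 h⟩
    have hxs : x ∈ PySem.Set.ofList tis := (hmem_s x).2 (by simp)
    -- min? of the set is x
    have hmin : PySem.List.min? (PySem.Set.ofList tis) (fun x => x) = some x := by
      rcases hm : PySem.List.min? (PySem.Set.ofList tis) (fun x => x) with _ | m
      · rw [PySem.List.min?_eq_none_iff] at hm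
        rw [hm] at hxs; simp at hxs
      · have hmm := PySem.List.min?_mem hm
        have hle : ∀ y ∈ PySem.Set.ofList tis, m ≤ y := fun y hy => PySem.List.min?_isMin hm y hy
        have h1 : m ≤ x := hle x hxs
        have h2 : x ≤ m := hxle m ((hmem_s m).1 hmm)
        exact congrArg some (le_antisymm h1 h2)
    rw [hmin]
    -- length of the set
    have hnodup : (PySem.Set.ofList tis).Nodup := PySem.Set.nodup_ofList tis
    have hfs : (PySem.Set.ofList tis).toFinset = (x :: xs).toFinset := by
      apply Finset.ext
      intro t
      simp only [List.mem_toFinset]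
      exact hmem_s t
    have hlen : (PySem.Set.ofList tis).length = (x :: xs).toFinset.card := by
      rw [← hfs, List.toFinset_card_of_nodup hnodup]
    have hxin : x ∈ (x :: xs).toFinset := by simp
    obtain ⟨m, hm⟩ : ∃ m, (PySem.Set.ofList tis).length = m + 1 := by
      have : 0 < (x :: xs).toFinset.card := Finset.card_pos.2 ⟨x, hxin⟩
      exact ⟨(PySem.Set.ofList tis).length - 1, by omega⟩
    -- fuel adequacy: pvDcount x xs ≤ m
    have hdc : pvDcount x xs ≤ m := by
      have hsub : xs.toFinset.filter (fun y => x < y) ⊆ (x :: xs).toFinset.erase x := by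
        intro y hy
        simp only [Finset.mem_filter, List.mem_toFinset, Finset.mem_erase, List.toFinset_cons,
          Finset.mem_insert] at hy ⊢
        exact ⟨by omega, Or.inr hy.1⟩
      have hce : ((x :: xs).toFinset.erase x).card = (x :: xs).toFinset.card - 1 :=
        Finset.card_erase_of_mem hxin
      have := Finset.card_le_card hsub
      unfold pvDcount
      omega
    -- A side characterization
    have hA : (List.foldl (pvRunStep ts) ([], none) (x :: xs)).1
        = (x :: pvHfun x xs).map (fun t => PySem.List.pyGetD ts t "") := by
      have hstep : pvRunStep ts ([], none) x = ([PySem.List.pyGetD ts x ""], some x) := by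
        simp [pvRunStep]
      rw [List.foldl_cons, hstep, foldRun_char]
      simp
    rw [hA, hm]
    show _ = pvChase ts (PySem.Set.ofList tis) (m + 1) x
    rw [pvChase_eq_map]
    have hchain : pvHfun x xs = pvChaseI (PySem.Set.ofList tis) m (x + 1) := by
      refine hfun_eq_chase (PySem.Set.ofList tis) xs x m (List.pairwise_cons.1 hsort).2 ?_ hdc
      intro t ht
      have hiff : t ∈ PySem.Set.ofList tis ↔ t ∈ xs := by
        rw [hmem_s t]
        constructor
        · intro h
          rcases List.mem_cons.1 h with rfl | h'
          · omega
          · exact h'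
        · intro h
          exact List.mem_cons_of_mem _ h
      simpa using hiff
    have hxtis : x ∈ tis := hperm.mem_iff.2 (by simp)
    simp [pvChaseI, hxtis, hchain]

-- ===== VERDICT (by name: the statement is the Claim_ definition above) =====
theorem target_words_for_each_source_word_spec : Claim_equal_target_words_for_each_source_word := by
  intro ss ts alignment hdom hpre
  unfold Spec_target_words_for_each_source_word
  unfold target_words_for_each_source_word target_words_for_each_source_word_alt
  simp only [pvParsePairB_eq]
  have hbound : ∀ p ∈ alignment.map pvParsePair, 0 ≤ p.2 ∧ p.2 < (ss.length : Int) := by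
    intro p hp
    obtain ⟨q, hq, rfl⟩ := List.mem_map.1 hp
    exact pvPairOK_si (hpre q hq)
  have hbs : ∀ p ∈ PySem.List.sorted (alignment.map pvParsePair) (fun p => p.1) false,
      0 ≤ p.2 ∧ p.2 < (ss.length : Int) := by
    intro p hp
    exact hbound p ((PySem.List.mem_sorted _ _ _ _).1 hp)
  obtain ⟨hA1, hA2, hAc⟩ := foldA_proj ts (PySem.List.sorted (alignment.map pvParsePair) (fun p => p.1) false)
    (List.replicate ss.length [], List.replicate ss.length []) (by simp) (by simpa using hbs)
  obtain ⟨hB1, hBc⟩ := foldB_proj PySem.Set.add ([] : PySem.Set Int) (alignment.map pvParsePair)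
    (List.replicate ss.length []) (by simpa using hbound)
  apply List.ext_getElem
  · simpa using by rw [hA1, hB1]; simp
  · intro i hi1 hi2
    have hin : i < ss.length := by simpa [hA1] using hi1
    rw [List.getElem_map, List.getElem_map]
    have e1 : (List.foldl (pvStepA ts) (List.replicate ss.length [], List.replicate ss.length [])
          (PySem.List.sorted (alignment.map pvParsePair) (fun p => p.1) false)).1.getD i []
        = ((((PySem.List.sorted (alignment.map pvParsePair) (fun p => p.1) false).filter
              (fun p => p.2 == (i : Int))).map (·.1)).foldl (pvRunStep ts) ([], none)).1 := by
      have h := hAc i (by simpa using hin)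
      have h' := congrArg Prod.fst h
      simpa using h'
    have e2 : (List.foldl (fun (bs : List (PySem.Set Int)) p =>
            PySem.List.pySetD bs p.2 (PySem.Set.add (PySem.List.pyGetD bs p.2 []) p.1))
          (List.replicate ss.length []) (alignment.map pvParsePair)).getD i []
        = PySem.Set.ofList (((alignment.map pvParsePair).filter (fun p => p.2 == (i : Int))).map (·.1)) := by
      rw [PySem.Set.ofList_eq_foldl]
      simpa using hBc i (by simpa using hin)
    have e3 : (((PySem.List.sorted (alignment.map pvParsePair) (fun p => p.1) false).filter
            (fun p => p.2 == (i : Int))).map (·.1))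
        = PySem.List.sorted (((alignment.map pvParsePair).filter (fun p => p.2 == (i : Int))).map (·.1))
            (fun x => x) false :=
      filter_sorted_fst (alignment.map pvParsePair) i
    rw [← List.getD_eq_getElem _ [] (by simpa using hi1), ← List.getD_eq_getElem _ [] (by simpa using hi2)]
    rw [e1, e2, e3, bucket_eq]
    rcases PySem.List.min? _ (fun x => x) with _ | t <;> rfl
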